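-- pv_equiv track=rewrite | github.com/oskarfahlstrom/codewars | digitwise-addition/digitwise_addition.py | digitwise_addition
-- ===== SOURCE A (Python) =====
-- from collections import deque
--
-- MOD = 10**9 + 7
--
-- def digitwise_addition(n: int, k: int) -> int:
--     digits = deque([0] * 10)
--     for digit in str(n):
--         digits[int(digit)] += 1
--     for _ in range(k):
--         digits.rotate()
--         digits[1] += digits[0]
--
--     return sum(digits) % MOD
-- ===== SOURCE B (Python) =====
-- MOD = 10**9 + 7
--
-- # one increment step is the linear map new = M @ old:
-- # digit d -> d+1 for d<9, digit 9 -> one 0 and one 1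
-- _M = [
--     [0, 0, 0, 0, 0, 0, 0, 0, 0, 1],
--     [1, 0, 0, 0, 0, 0, 0, 0, 0, 1],
--     [0, 1, 0, 0, 0, 0, 0, 0, 0, 0],
--     [0, 0, 1, 0, 0, 0, 0, 0, 0, 0],
--     [0, 0, 0, 1, 0, 0, 0, 0, 0, 0],
--     [0, 0, 0, 0, 1, 0, 0, 0, 0, 0],
--     [0, 0, 0, 0, 0, 1, 0, 0, 0, 0],
--     [0, 0, 0, 0, 0, 0, 1, 0, 0, 0],
--     [0, 0, 0, 0, 0, 0, 0, 1, 0, 0],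
--     [0, 0, 0, 0, 0, 0, 0, 0, 1, 0],
-- ]
--
-- def _mul(a, b):
--     return [[sum(a[i][l] * b[l][j] for l in range(10)) % MOD
--              for j in range(10)] for i in range(10)]
--
-- def _pow(m, e):
--     if e == 0:
--         return [[1 if i == j else 0 for j in range(10)] for i in range(10)]
--     h = _pow(_mul(m, m), e // 2)
--     return _mul(m, h) if e % 2 == 1 else h
--
-- def _apply(m, v):
--     return [sum(m[i][j] * v[j] for j in range(10)) % MOD for i in range(10)]
--
-- def digitwise_addition(n: int, k: int) -> int:
--     counts = [0] * 10
--     for ch in str(n):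
--         counts[int(ch)] += 1
--     w = _apply(_pow(_M, max(k, 0)), counts)
--     return sum(w) % MOD
-- ===== Notes on version B (the rewrite author's own statement) =====
-- stated objective: faster
-- what changed: Replaces the O(k) per-step deque rotation loop by exponentiation-by-squaring of the 10x10 digit-transition matrix modulo 1e9+7, applied once to the digit-count vector.
import Mathlib
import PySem

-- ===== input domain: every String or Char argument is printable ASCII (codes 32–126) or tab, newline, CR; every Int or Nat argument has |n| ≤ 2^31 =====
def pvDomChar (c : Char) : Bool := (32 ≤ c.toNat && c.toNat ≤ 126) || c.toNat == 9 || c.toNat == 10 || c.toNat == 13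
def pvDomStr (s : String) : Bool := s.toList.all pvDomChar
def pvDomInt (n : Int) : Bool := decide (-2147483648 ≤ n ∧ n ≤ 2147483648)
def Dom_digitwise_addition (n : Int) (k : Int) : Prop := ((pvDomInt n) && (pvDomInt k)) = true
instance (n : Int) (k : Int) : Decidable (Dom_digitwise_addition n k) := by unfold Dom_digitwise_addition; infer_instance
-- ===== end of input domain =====

-- B replaces A's O(k) one-step-at-a-time deque loop by exponentiation-by-squaring of the
-- 10x10 digit-transition matrix mod 1e9+7 (O(log k) matrix products); equivalence of the
-- return values is proved for n ≥ 0 (Python A raises ValueError on int('-') for n < 0).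

-- ===== PORT A =====
-- digits = [0]*10; for digit in str(n): digits[int(digit)] += 1
-- (int('-') raises ValueError for n < 0 — excluded by Pre_; the .getD 0 there is unreachable under Pre_)
def pvCountsA (n : Int) : List Int :=
  (PySem.Int.toChars n).foldl
    (fun d c =>
      let i : Int := (PySem.Int.ofChars? [c]).getD 0
      PySem.List.pySetD d i (PySem.List.pyGetD d i 0 + 1))
    (List.replicate 10 0)

-- one iteration of A's loop body: digits.rotate(); digits[1] += digits[0]
-- (the deque always has 10 elements, so the indexing never raises)
def pvStepA (d : List Int) : List Int :=
  let r : List Int := (d.getLast?.getD 0) :: d.dropLast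
  PySem.List.pySetD r 1 (PySem.List.pyGetD r 1 0 + PySem.List.pyGetD r 0 0)

def digitwise_addition (n : Int) (k : Int) : Int :=
  let digits := pvCountsA n
  let digits := (List.range k.toNat).foldl (fun d _ => pvStepA d) digits
  digits.sum % 1000000007

-- ===== PORT B =====
-- the transition matrix _M of Source B (literal)
def pvMatM : List (List Int) :=
  [[0, 0, 0, 0, 0, 0, 0, 0, 0, 1],
   [1, 0, 0, 0, 0, 0, 0, 0, 0, 1],
   [0, 1, 0, 0, 0, 0, 0, 0, 0, 0],
   [0, 0, 1, 0, 0, 0, 0, 0, 0, 0],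
   [0, 0, 0, 1, 0, 0, 0, 0, 0, 0],
   [0, 0, 0, 0, 1, 0, 0, 0, 0, 0],
   [0, 0, 0, 0, 0, 1, 0, 0, 0, 0],
   [0, 0, 0, 0, 0, 0, 1, 0, 0, 0],
   [0, 0, 0, 0, 0, 0, 0, 1, 0, 0],
   [0, 0, 0, 0, 0, 0, 0, 0, 1, 0]]

-- _mul: indices always in range (all matrices are 10x10), so .getD is exact
def pvMul (a b : List (List Int)) : List (List Int) :=
  (List.range 10).map fun i => (List.range 10).map fun j =>
    ((List.range 10).map fun l => (a.getD i []).getD l 0 * (b.getD l []).getD j 0).sum % 1000000007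

-- the identity matrix built in _pow's base case
def pvIdM : List (List Int) :=
  (List.range 10).map fun i => (List.range 10).map fun j => if i = j then (1 : Int) else 0

def pvPow (m : List (List Int)) (e : Nat) : List (List Int) :=
  if h : e = 0 then pvIdM
  else
    let hh := pvPow (pvMul m m) (e / 2)
    if e % 2 = 1 then pvMul m hh else hh
  termination_by e
  decreasing_by exact Nat.div_lt_self (Nat.pos_of_ne_zero h) (by norm_num)

def pvApply (m : List (List Int)) (v : List Int) : List Int :=
  (List.range 10).map fun i =>
    ((List.range 10).map fun j => (m.getD i []).getD j 0 * v.getD j 0).sum % 1000000007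

-- counts = [0]*10; for ch in str(n): counts[int(ch)] += 1   (same parsing loop as A's first phase)
def pvCountsB (n : Int) : List Int :=
  (PySem.Int.toChars n).foldl
    (fun d c =>
      let i : Int := (PySem.Int.ofChars? [c]).getD 0
      PySem.List.pySetD d i (PySem.List.pyGetD d i 0 + 1))
    (List.replicate 10 0)

def digitwise_addition_alt (n : Int) (k : Int) : Int :=
  let counts := pvCountsB n
  let w := pvApply (pvPow pvMatM (max k 0).toNat) counts
  w.sum % 1000000007

-- ===== PRECONDITION & SPEC =====
-- Pre_ excludes n < 0: there str(n) starts with '-' and int('-') raises ValueError in A (and in B).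
def Pre_digitwise_addition (n : Int) (k : Int) : Prop := 0 ≤ n
instance (n : Int) (k : Int) : Decidable (Pre_digitwise_addition n k) := by
  unfold Pre_digitwise_addition; infer_instance

def pvWitness_digitwise_addition : Int × Int := (12345, 7)

def Spec_digitwise_addition (n : Int) (k : Int) (out : Int) : Prop := out = digitwise_addition_alt n k
instance (n : Int) (k : Int) (out : Int) : Decidable (Spec_digitwise_addition n k out) := by
  unfold Spec_digitwise_addition; infer_instance

-- ===== CLAIM (what is proved, stated in full; the proofs are below) =====
def Claim_equal_digitwise_addition : Prop :=
  ∀ (n : Int) (k : Int), Dom_digitwise_addition n k → Pre_digitwise_addition n k →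
    Spec_digitwise_addition n k (digitwise_addition n k)

-- ===== LEMMAS AND PROOFS =====

abbrev pvZM : Type := ZMod 1000000007

def pvToV (v : List Int) : Fin 10 → pvZM := fun i => ((v.getD i 0 : Int) : pvZM)

def pvToM (m : List (List Int)) : Matrix (Fin 10) (Fin 10) pvZM :=
  Matrix.of fun i j => (((m.getD i []).getD j 0 : Int) : pvZM)

theorem pv_cast_mod (a : Int) : ((a % 1000000007 : Int) : pvZM) = (a : pvZM) := by
  have : ((1000000007 : Int)) = ((1000000007 : Nat) : Int) := by norm_num
  rw [this]; exact ZMod.intCast_mod a 1000000007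

theorem pv_witness_ok :
    Dom_digitwise_addition pvWitness_digitwise_addition.1 pvWitness_digitwise_addition.2 ∧
    Pre_digitwise_addition pvWitness_digitwise_addition.1 pvWitness_digitwise_addition.2 := by
  decide

theorem pv_exists_ten (v : List Int) (h : v.length = 10) :
    ∃ a0 a1 a2 a3 a4 a5 a6 a7 a8 a9 : Int,
      v = [a0, a1, a2, a3, a4, a5, a6, a7, a8, a9] := by
  match v, h with
  | [a0, a1, a2, a3, a4, a5, a6, a7, a8, a9], _ =>
    exact ⟨a0, a1, a2, a3, a4, a5, a6, a7, a8, a9, rfl⟩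

theorem pv_getD_range_map {α : Type} (f : Nat → α) (d : α) (i : Fin 10) :
    (((List.range 10).map f).getD (i : Nat) d) = f i := by
  fin_cases i <;> rfl

theorem pv_sum_range_map (g : Nat → pvZM) :
    ((List.range 10).map g).sum = ∑ l : Fin 10, g l := by
  simp [Fin.sum_univ_succ, List.range_succ]

theorem pv_toM_mul (a b : List (List Int)) : pvToM (pvMul a b) = pvToM a * pvToM b := by
  funext i j
  show (((pvMul a b).getD (i : Nat) []).getD (j : Nat) 0 : pvZM) = _
  rw [pvMul, pv_getD_range_map, pv_getD_range_map, pv_cast_mod, Int.cast_list_sum,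
    List.map_map, Matrix.mul_apply, pv_sum_range_map]
  apply Finset.sum_congr rfl
  intro l _
  simp only [Function.comp_apply, pvToM, Matrix.of_apply]
  push_cast
  rfl

theorem pv_toV_apply (m : List (List Int)) (v : List Int) :
    pvToV (pvApply m v) = (pvToM m).mulVec (pvToV v) := by
  funext i
  show (((pvApply m v).getD (i : Nat) 0 : Int) : pvZM) = _
  rw [pvApply, pv_getD_range_map, pv_cast_mod, Int.cast_list_sum, List.map_map,
    pv_sum_range_map]
  simp only [Matrix.mulVec, dotProduct]
  apply Finset.sum_congr rfl
  intro l _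
  simp only [Function.comp_apply, pvToM, pvToV, Matrix.of_apply]
  push_cast
  rfl

theorem pv_toM_id : pvToM pvIdM = 1 := by
  funext i j
  show ((((pvIdM).getD (i : Nat) []).getD (j : Nat) 0 : Int) : pvZM) = _
  rw [pvIdM, pv_getD_range_map, pv_getD_range_map, Matrix.one_apply]
  by_cases h : i = j
  · simp [h]
  · have : (i : Nat) ≠ (j : Nat) := fun hh => h (Fin.ext hh)
    simp [h, this]

theorem pv_toM_pow (m : List (List Int)) (e : Nat) : pvToM (pvPow m e) = (pvToM m) ^ e := by
  induction e using Nat.strong_induction_on generalizing m with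
  | _ e ih =>
    rw [pvPow]
    split_ifs with h hp
    · simp [h, pv_toM_id]
    · have hlt : e / 2 < e := Nat.div_lt_self (Nat.pos_of_ne_zero h) (by norm_num)
      have ihh := ih (e / 2) hlt (pvMul m m)
      rw [pv_toM_mul] at ihh
      have he : 2 * (e / 2) + 1 = e := by omega
      rw [pv_toM_mul, ihh, ← sq, ← pow_mul, ← pow_succ', he]
    · have hlt : e / 2 < e := Nat.div_lt_self (Nat.pos_of_ne_zero h) (by norm_num)
      have ihh := ih (e / 2) hlt (pvMul m m)
      rw [pv_toM_mul] at ihh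
      have he : 2 * (e / 2) = e := by omega
      rw [ihh, ← sq, ← pow_mul, he]

theorem pv_step_len (v : List Int) (h : v.length = 10) : (pvStepA v).length = 10 := by
  obtain ⟨a0, a1, a2, a3, a4, a5, a6, a7, a8, a9, rfl⟩ := pv_exists_ten v h
  rfl

theorem pv_step_eval (a0 a1 a2 a3 a4 a5 a6 a7 a8 a9 : Int) :
    pvStepA [a0, a1, a2, a3, a4, a5, a6, a7, a8, a9] =
      [a9, a0 + a9, a1, a2, a3, a4, a5, a6, a7, a8] := by
  rfl

theorem pv_step_toV (v : List Int) (h : v.length = 10) :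
    pvToV (pvStepA v) = (pvToM pvMatM).mulVec (pvToV v) := by
  obtain ⟨a0, a1, a2, a3, a4, a5, a6, a7, a8, a9, rfl⟩ := pv_exists_ten v h
  rw [pv_step_eval]
  funext i
  fin_cases i <;>
    simp [pvToV, pvToM, pvMatM, Matrix.mulVec, dotProduct, Fin.sum_univ_succ]

theorem pv_iter_len (v : List Int) (h : v.length = 10) (m : Nat) :
    (pvStepA^[m] v).length = 10 := by
  induction m with
  | zero => simpa
  | succ m ih => rw [Function.iterate_succ_apply']; exact pv_step_len _ ih

theorem pv_iter_toV (v : List Int) (h : v.length = 10) (m : Nat) :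
    pvToV (pvStepA^[m] v) = ((pvToM pvMatM) ^ m).mulVec (pvToV v) := by
  induction m with
  | zero => simp
  | succ m ih =>
    rw [Function.iterate_succ_apply', pv_step_toV _ (pv_iter_len v h m), ih,
      pow_succ', Matrix.mulVec_mulVec]

theorem pv_foldl_iterate (v : List Int) (m : Nat) :
    (List.range m).foldl (fun d _ => pvStepA d) v = pvStepA^[m] v := by
  induction m with
  | zero => rfl
  | succ m ih =>
    rw [List.range_succ, List.foldl_append, ih, List.foldl_cons, List.foldl_nil,
      Function.iterate_succ_apply']

theorem pv_counts_len (n : Int) : (pvCountsA n).length = 10 := by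
  rw [pvCountsA]
  generalize (PySem.Int.toChars n) = cs
  induction cs using List.reverseRecOn with
  | nil => rfl
  | append_singleton cs c ih =>
    rw [List.foldl_append, List.foldl_cons, List.foldl_nil, PySem.List.length_pySetD]
    exact ih

theorem pv_sum_toV (v : List Int) (h : v.length = 10) :
    ((v.sum : Int) : pvZM) = ∑ i : Fin 10, pvToV v i := by
  obtain ⟨a0, a1, a2, a3, a4, a5, a6, a7, a8, a9, rfl⟩ := pv_exists_ten v h
  simp [pvToV, Fin.sum_univ_succ]

theorem pv_apply_len (m : List (List Int)) (v : List Int) : (pvApply m v).length = 10 := by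
  simp [pvApply]

theorem pv_mod_eq_of_cast_eq (a b : Int) (h : (a : pvZM) = (b : pvZM)) :
    a % 1000000007 = b % 1000000007 := by
  have hm : a ≡ b [ZMOD (1000000007 : Nat)] := (ZMod.intCast_eq_intCast_iff _ _ _).mp h
  simpa using hm

-- ===== VERDICT (by name: the statement is the Claim_ definition above) =====
theorem digitwise_addition_spec : Claim_equal_digitwise_addition := by
  intro n k _ _
  show digitwise_addition n k = digitwise_addition_alt n k
  rw [digitwise_addition, digitwise_addition_alt]
  have hcounts : pvCountsB n = pvCountsA n := rfl
  rw [hcounts]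
  set v := pvCountsA n with hv
  have hlen : v.length = 10 := pv_counts_len n
  have hmax : (max k 0).toNat = k.toNat := by omega
  apply pv_mod_eq_of_cast_eq
  rw [pv_sum_toV _ (by rw [pv_foldl_iterate]; exact pv_iter_len v hlen k.toNat),
      pv_sum_toV _ (pv_apply_len _ _)]
  apply Finset.sum_congr rfl
  intro i _
  rw [pv_foldl_iterate]
  have h1 : pvToV (pvStepA^[k.toNat] v) = ((pvToM pvMatM) ^ k.toNat).mulVec (pvToV v) :=
    pv_iter_toV v hlen k.toNat
  have h2 : pvToV (pvApply (pvPow pvMatM (max k 0).toNat) v) =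
      ((pvToM pvMatM) ^ k.toNat).mulVec (pvToV v) := by
    rw [pv_toV_apply, pv_toM_pow, hmax]
  rw [show pvToV (pvStepA^[k.toNat] v) i = _ from congrFun h1 i,
      show pvToV (pvApply (pvPow pvMatM (max k 0).toNat) v) i = _ from congrFun h2 i]
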